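-- pv_equiv track=rewrite | github.com/python-rstmks/python_cli | unitmain.py | output_ranking
-- ===== SOURCE A (Python) =====
-- def output_ranking(avgscore_to_player: dict[int, list[str]]) -> list[str]:
--
--     output_data = []
--
--     REPORT_RANKINGS = 10
--
--     rank: int = 1
--
--     for avg_score, player_with_samescore in avgscore_to_player.items():
--
--         if rank > REPORT_RANKINGS:
--             break
--
--         for player_id in player_with_samescore:
--
--             output_data.append("{} {} {}".format(rank, player_id, avg_score))
--
--         rank += len(player_with_samescore)
--
--     return output_data
-- ===== SOURCE B (Python) =====
-- def output_ranking(avgscore_to_player: dict[int, list[str]]) -> list[str]: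
--     # Phase 1: table of (start_rank, avg_score, players) for every score group.
--     table = []
--     rank = 1
--     for avg_score, players in avgscore_to_player.items():
--         table.append((rank, avg_score, players))
--         rank += len(players)
--     # Phase 2: keep whole groups whose starting rank is within the top 10.
--     return ["{} {} {}".format(start_rank, player_id, avg_score)
--             for (start_rank, avg_score, players) in table
--             if start_rank <= 10
--             for player_id in players]
-- ===== Notes on version B (the rewrite author's own statement) =====
-- stated objective: alternative
-- what changed: Replaces the single stateful loop with early break by a two-phase decomposition: first build a rank table (start_rank, score, players) over all groups, then emit lines with a flattening comprehension that filters groups by start_rank <= 10.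
import Mathlib
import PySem

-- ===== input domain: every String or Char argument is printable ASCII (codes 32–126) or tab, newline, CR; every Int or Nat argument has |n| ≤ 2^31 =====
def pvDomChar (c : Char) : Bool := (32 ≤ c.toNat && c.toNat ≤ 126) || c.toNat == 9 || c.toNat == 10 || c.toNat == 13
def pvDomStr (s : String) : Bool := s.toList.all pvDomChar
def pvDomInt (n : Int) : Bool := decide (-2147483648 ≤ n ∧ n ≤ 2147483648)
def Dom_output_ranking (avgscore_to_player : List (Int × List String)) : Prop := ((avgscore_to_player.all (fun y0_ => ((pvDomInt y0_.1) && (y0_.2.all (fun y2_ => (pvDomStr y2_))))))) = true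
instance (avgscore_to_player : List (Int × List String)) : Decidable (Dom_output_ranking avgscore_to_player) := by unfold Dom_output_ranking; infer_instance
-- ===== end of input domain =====

-- B replaces A's stateful loop-with-break by a build-rank-table-then-filter decomposition (alternative, same cost).


-- ===== PORT A =====
-- "{} {} {}".format(rank, player_id, avg_score)
def pvLine (rank : Int) (player : String) (avg : Int) : String :=
  PySem.Int.toStr rank ++ " " ++ player ++ " " ++ PySem.Int.toStr avg

-- the loop of A: carries rank, breaks when rank > 10, appends one line per player of the group
def pvLoopA : List (Int × List String) → Int → List String
  | [], _ => []
  | (avg, players) :: rest, rank =>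
    if rank > 10 then []
    else players.map (fun p => pvLine rank p avg) ++ pvLoopA rest (rank + players.length)

def output_ranking (avgscore_to_player : List (Int × List String)) : List String :=
  pvLoopA avgscore_to_player 1

-- ===== PORT B =====
-- Phase 1: table of (start_rank, avg_score, players)
def pvTable : List (Int × List String) → Int → List (Int × Int × List String)
  | [], _ => []
  | (avg, players) :: rest, rank => (rank, avg, players) :: pvTable rest (rank + players.length)

def output_ranking_alt (avgscore_to_player : List (Int × List String)) : List String :=
  -- Phase 2: flattening comprehension filtering by start_rank ≤ 10
  (pvTable avgscore_to_player 1).flatMap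
    (fun g => if g.1 ≤ 10 then g.2.2.map (fun p => pvLine g.1 p g.2.1) else [])

-- ===== PRECONDITION & SPEC =====
def Spec_output_ranking (avgscore_to_player : List (Int × List String)) (out : List String) : Prop := out = output_ranking_alt avgscore_to_player
instance (avgscore_to_player : List (Int × List String)) (out : List String) : Decidable (Spec_output_ranking avgscore_to_player out) := by unfold Spec_output_ranking; infer_instance

-- ===== CLAIM (what is proved, stated in full; the proofs are below) =====
def Claim_equal_output_ranking : Prop := ∀ (avgscore_to_player : List (Int × List String)), Dom_output_ranking avgscore_to_player → Spec_output_ranking avgscore_to_player (output_ranking avgscore_to_player)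

-- ===== LEMMAS AND PROOFS =====

-- once the starting rank exceeds 10, the whole remaining table is filtered away
theorem pvTable_flat_nil (xs : List (Int × List String)) (r : Int) (h : r > 10) :
    (pvTable xs r).flatMap
      (fun g => if g.1 ≤ 10 then g.2.2.map (fun p => pvLine g.1 p g.2.1) else []) = [] := by
  induction xs generalizing r with
  | nil => simp [pvTable]
  | cons hd tl ih =>
    obtain ⟨avg, players⟩ := hd
    simp only [pvTable, List.flatMap_cons]
    rw [if_neg (by omega), ih (r + players.length) (by have := Int.natCast_nonneg players.length; omega)]
    simp

theorem pvLoopA_eq (xs : List (Int × List String)) (r : Int) :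
    pvLoopA xs r = (pvTable xs r).flatMap
      (fun g => if g.1 ≤ 10 then g.2.2.map (fun p => pvLine g.1 p g.2.1) else []) := by
  induction xs generalizing r with
  | nil => simp [pvLoopA, pvTable]
  | cons hd tl ih =>
    obtain ⟨avg, players⟩ := hd
    simp only [pvLoopA, pvTable, List.flatMap_cons]
    by_cases h : r > 10
    · rw [if_pos h, if_neg (by omega)]
      rw [pvTable_flat_nil tl (r + players.length) (by have := Int.natCast_nonneg players.length; omega)]
      simp
    · rw [if_neg h, if_pos (by omega), ih]

-- ===== VERDICT (by name: the statement is the Claim_ definition above) =====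
theorem output_ranking_spec : Claim_equal_output_ranking := by
  intro xs _
  unfold Spec_output_ranking output_ranking output_ranking_alt
  exact pvLoopA_eq xs 1
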